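-- pv_equiv track=rewrite | github.com/agatanyc/RC | algorithms_DS/python/intersperse.py | intersperse_2
-- ===== SOURCE A (Python) =====
-- def intersperse_2(ys):
--     r = []
--     range_length = len(max(ys, key=len))
--     for i in range(range_length):
--         for y in ys:
--             if i < len(y):
--                 r.append(y[i])
--     return r
-- ===== SOURCE B (Python) =====
-- def intersperse_2(ys):
--     n = max(len(y) for y in ys)
--     columns = [[] for _ in range(n)]
--     for y in ys:
--         for i, v in enumerate(y):
--             columns[i].append(v)
--     r = []
--     for col in columns:
--         r.extend(col)
--     return r
-- ===== Notes on version B (the rewrite author's own statement) =====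
-- stated objective: alternative
-- what changed: Replaced the column-major double loop (outer over column index i, inner rescanning every row for its i-th element) by a single row-major bucketing pass into an explicit columns table, then concatenating the columns in index order.
-- outside the precondition, e.g. on intersperse_2([]): A raises ValueError, B raises ValueError
import Mathlib
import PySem

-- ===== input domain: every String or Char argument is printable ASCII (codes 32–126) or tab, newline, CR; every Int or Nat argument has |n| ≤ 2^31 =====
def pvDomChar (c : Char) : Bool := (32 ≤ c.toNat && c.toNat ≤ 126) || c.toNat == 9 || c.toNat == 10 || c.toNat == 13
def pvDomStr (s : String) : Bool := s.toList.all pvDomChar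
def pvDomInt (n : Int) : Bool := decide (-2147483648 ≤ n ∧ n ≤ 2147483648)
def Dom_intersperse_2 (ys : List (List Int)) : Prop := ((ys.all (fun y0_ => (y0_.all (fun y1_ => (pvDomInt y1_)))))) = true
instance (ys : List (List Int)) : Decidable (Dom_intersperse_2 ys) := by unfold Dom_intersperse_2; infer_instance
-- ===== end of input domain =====

-- B replaces A's column-major double loop by one row-major bucketing pass into a columns table,
-- then concatenates the columns; same output, different traversal (objective: alternative).

-- ===== PORT A =====
-- literal port of A: r = []; for i in range(len(max(ys, key=len))): for y in ys: if i < len(y): r.append(y[i])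
def intersperse_2 (ys : List (List Int)) : List Int :=
  match PySem.List.max? ys (fun y => (y.length : Int)) with
  | none => []      -- max([]) raises ValueError; excluded by Pre_intersperse_2
  | some m =>
    let rangeLength : Int := m.length
    (PySem.List.pyRange 0 rangeLength 1).foldl (fun r i =>
      ys.foldl (fun r y =>
        if i < (y.length : Int) then r ++ [(PySem.List.pyGet? y i).getD 0] else r) r) []

-- ===== PORT B =====
-- literal port of Source B: n = max(len(y) for y in ys); columns = [[] for _ in range(n)];
-- row-major bucketing via enumerate; then r.extend(col) over columns.
-- enumerate indices are ≥ 0, so .toNat is exact here (no negative-index wrap possible).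
def intersperse_2_alt (ys : List (List Int)) : List Int :=
  match PySem.List.max? (ys.map (fun y => (y.length : Int))) (fun x => x) with
  | none => []      -- max of empty generator raises ValueError; excluded by Pre_intersperse_2
  | some n =>
    let columns0 := (PySem.List.pyRange 0 n 1).map (fun _ => ([] : List Int))
    let columns := ys.foldl (fun cols y =>
      (PySem.List.enumerate y 0).foldl (fun cols iv =>
        cols.set iv.1.toNat ((cols.getD iv.1.toNat []) ++ [iv.2])) cols) columns0
    columns.foldl (fun r col => r ++ col) []

-- ===== PRECONDITION & SPEC =====
-- Pre_ excludes only ys = [], on which both A and B raise ValueError (max of an empty sequence).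
def Pre_intersperse_2 (ys : List (List Int)) : Prop := ys ≠ []
instance (ys : List (List Int)) : Decidable (Pre_intersperse_2 ys) := by unfold Pre_intersperse_2; infer_instance
def pvWitness_intersperse_2 : List (List Int) := [[1, 2], [3], [4, 5, 6]]
def Spec_intersperse_2 (ys : List (List Int)) (out : List Int) : Prop := out = intersperse_2_alt ys
instance (ys : List (List Int)) (out : List Int) : Decidable (Spec_intersperse_2 ys out) := by unfold Spec_intersperse_2; infer_instance

-- ===== CLAIM (what is proved, stated in full; the proofs are below) =====
def Claim_equal_intersperse_2 : Prop := ∀ (ys : List (List Int)), Dom_intersperse_2 ys → Pre_intersperse_2 ys → Spec_intersperse_2 ys (intersperse_2 ys)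

-- ===== LEMMAS AND PROOFS =====

-- the contents of column i (in row order); both programs produce the concatenation of these
def pvCol (ys : List (List Int)) (i : Int) : List Int :=
  ys.flatMap (fun y => if i < (y.length : Int) then [(PySem.List.pyGet? y i).getD 0] else [])

theorem pvInnerA (ys : List (List Int)) (i : Int) (acc : List Int) :
    ys.foldl (fun r y =>
      if i < (y.length : Int) then r ++ [(PySem.List.pyGet? y i).getD 0] else r) acc
      = acc ++ pvCol ys i := by
  induction ys generalizing acc with
  | nil => simp [pvCol]
  | cons y t ih =>
    simp only [List.foldl_cons, pvCol, List.flatMap_cons]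
    rw [ih]
    split <;> simp [pvCol]

theorem pvOuterA (l : List Int) (ys : List (List Int)) (acc : List Int) :
    l.foldl (fun r i =>
      ys.foldl (fun r y =>
        if i < (y.length : Int) then r ++ [(PySem.List.pyGet? y i).getD 0] else r) r) acc
      = acc ++ l.flatMap (pvCol ys) := by
  induction l generalizing acc with
  | nil => simp
  | cons i t ih => rw [List.foldl_cons, pvInnerA, ih, List.flatMap_cons, List.append_assoc]

-- one bucketed row: length preserved, and each slot gains the row's element at that index (if any)
theorem pvRowLen (p : List (Int × Int)) (cols : List (List Int)) :
    (p.foldl (fun cols iv =>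
      cols.set iv.1.toNat ((cols.getD iv.1.toNat []) ++ [iv.2])) cols).length = cols.length := by
  induction p generalizing cols with
  | nil => rfl
  | cons hd t ih => rw [List.foldl_cons, ih, List.length_set]

theorem pvRowGet (y : List Int) (s : Nat) (cols : List (List Int))
    (hlen : s + y.length ≤ cols.length) (j : Nat) (hj : j < cols.length) :
    ((PySem.List.enumerate y (s : Int)).foldl (fun cols iv =>
      cols.set iv.1.toNat ((cols.getD iv.1.toNat []) ++ [iv.2])) cols)[j]? =
      some (cols.getD j [] ++
        (if s ≤ j ∧ j < s + y.length then [(PySem.List.pyGet? y ((j : Int) - s)).getD 0] else [])) := by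
  induction y generalizing cols s with
  | nil =>
    simp only [PySem.List.enumerate_nil, List.foldl_nil, List.length_nil] at *
    have : ¬ (s ≤ j ∧ j < s + 0) := by omega
    simp [List.getD_eq_getElem?_getD, List.getElem?_eq_getElem hj]
  | cons v t ih =>
    rw [PySem.List.enumerate_cons, List.foldl_cons]
    have hs : ((s : Int)).toNat = s := by simp
    have hcast : (s : Int) + 1 = ((s + 1 : Nat) : Int) := by push_cast; ring
    rw [hcast]
    have hlen' : (s + 1) + t.length ≤ (cols.set s (cols.getD s [] ++ [v])).length := by
      simp only [List.length_set]; simp at hlen ⊢; omega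
    rw [hs, ih (s + 1) _ hlen' ]
    · by_cases hcase : s ≤ j ∧ j < s + (v :: t).length
      · by_cases hj0 : j = s
        · subst hj0
          have hnot : ¬ (j + 1 ≤ j ∧ j < j + 1 + t.length) := by omega
          simp only [hcase, hnot]
          have : ((j : Int) - j) = 0 := by ring
          rw [this]
          simp [List.getD_eq_getElem?_getD, List.getElem?_set_self (by omega : j < cols.length)]
        · have hcase' : (s + 1 ≤ j ∧ j < (s + 1) + t.length) := by
            simp at hcase; constructor <;> omega
          simp only [if_pos hcase, if_pos hcase']
          have hne : s ≠ j := fun h => hj0 h.symm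
          have hgd : (cols.set s (cols.getD s [] ++ [v])).getD j [] = cols.getD j [] := by
            simp [List.getD_eq_getElem?_getD, List.getElem?_set_ne hne]
          rw [hgd]
          have this1 : (PySem.List.pyGet? (v :: t) ((j : Int) - s))
              = PySem.List.pyGet? t ((j : Int) - ((s + 1 : Nat) : Int)) := by
            have h1 : ((j : Int) - s) = ((j - s : Nat) : Int) := by omega
            have h2 : ((j : Int) - ((s + 1 : Nat) : Int)) = ((j - (s+1) : Nat) : Int) := by omega
            rw [h1, h2, PySem.List.pyGet?_natCast, PySem.List.pyGet?_natCast]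
            have hk : j - s = (j - (s + 1)) + 1 := by omega
            rw [hk]; simp
          rw [this1]
      · have hcase' : ¬ (s + 1 ≤ j ∧ j < (s + 1) + t.length) := by
          simp only [List.length_cons] at hcase; omega
        simp only [if_neg hcase, if_neg hcase', List.append_nil]
        have hne : s ≠ j := by simp only [List.length_cons] at hcase; omega
        simp [List.getD_eq_getElem?_getD, List.getElem?_set_ne hne]
    · rw [List.length_set]; exact hj

-- bucketing all rows: slot j of the final table is pvCol ys j appended to slot j of the start table
theorem pvBucket (ys : List (List Int)) (cols : List (List Int))
    (hlen : ∀ y ∈ ys, y.length ≤ cols.length) (j : Nat) (hj : j < cols.length) :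
    (ys.foldl (fun cols y =>
      (PySem.List.enumerate y 0).foldl (fun cols iv =>
        cols.set iv.1.toNat ((cols.getD iv.1.toNat []) ++ [iv.2])) cols) cols)[j]? =
      some (cols.getD j [] ++ pvCol ys (j : Int)) := by
  induction ys generalizing cols with
  | nil => simp [pvCol, List.getD_eq_getElem?_getD, List.getElem?_eq_getElem hj]
  | cons y t ih =>
    rw [List.foldl_cons]
    have h0 : ((0 : Nat) : Int) = (0 : Int) := by simp
    set cols' := (PySem.List.enumerate y 0).foldl (fun cols iv =>
        cols.set iv.1.toNat ((cols.getD iv.1.toNat []) ++ [iv.2])) cols with hcols'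
    have hlc : cols'.length = cols.length := by rw [hcols', ← h0]; exact pvRowLen _ _
    have hlen' : ∀ z ∈ t, z.length ≤ cols'.length := by
      intro z hz; rw [hlc]; exact hlen z (List.mem_cons_of_mem _ hz)
    rw [ih cols' hlen' (by rw [hlc]; exact hj)]
    have hget : cols'[j]? = some (cols.getD j [] ++
        (if 0 ≤ j ∧ j < 0 + y.length then [(PySem.List.pyGet? y ((j : Int) - 0)).getD 0] else [])) := by
      rw [hcols', ← h0]
      exact pvRowGet y 0 cols (by simpa using hlen y (List.mem_cons_self)) j hj
    have hgd : cols'.getD j [] = cols.getD j [] ++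
        (if 0 ≤ j ∧ j < 0 + y.length then [(PySem.List.pyGet? y ((j : Int) - 0)).getD 0] else []) := by
      simp [List.getD_eq_getElem?_getD, hget]
    rw [hgd]
    simp only [pvCol, List.flatMap_cons, Nat.zero_le, true_and, Nat.zero_add, Int.sub_zero,
      List.append_assoc]
    congr 1
    by_cases hy : j < y.length
    · have : ((j : Int)) < (y.length : Int) := by exact_mod_cast hy
      simp [hy, this]
    · have : ¬ ((j : Int) < (y.length : Int)) := by exact_mod_cast hy
      simp [hy, this]

theorem pvFlattenCols (c : List (List Int)) (f : Nat → List Int) (s : Nat)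
    (h : ∀ j (hj : j < c.length), (c.get ⟨j, hj⟩) = f (s + j)) :
    c.flatten = (List.range c.length).flatMap (fun k => f (s + k)) := by
  induction c generalizing s with
  | nil => rfl
  | cons a t ih =>
    have ha : a = f (s + 0) := h 0 (by simp)
    have ht : t.flatten = (List.range t.length).flatMap (fun k => f ((s + 1) + k)) := by
      refine ih (s + 1) ?_
      intro j hj
      have := h (j + 1) (by simp; omega)
      simpa [Nat.add_assoc, Nat.add_comm 1 j] using this
    rw [List.flatten_cons, ha, ht, List.length_cons, List.range_succ_eq_map,
      List.flatMap_cons, List.flatMap_map]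
    congr 1
    refine congrArg (fun g => List.flatMap g (List.range t.length)) ?_
    funext k
    congr 1
    omega

theorem pvExtend (cols : List (List Int)) (acc : List Int) :
    cols.foldl (fun r col => r ++ col) acc = acc ++ cols.flatten := by
  induction cols generalizing acc with
  | nil => simp
  | cons c t ih => rw [List.foldl_cons, ih, List.flatten_cons, List.append_assoc]

-- ===== VERDICT (by name: the statement is the Claim_ definition above) =====
theorem intersperse_2_spec : Claim_equal_intersperse_2 := by
  intro ys _ hpre
  unfold Spec_intersperse_2 intersperse_2 intersperse_2_alt
  -- A's max(ys, key=len) and B's max(len(y) for y in ys) both succeed (ys ≠ []) and agree on the length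
  obtain ⟨m, hA⟩ : ∃ m, PySem.List.max? ys (fun y => (y.length : Int)) = some m := by
    cases h : PySem.List.max? ys (fun y => (y.length : Int)) with
    | none => exact absurd ((PySem.List.max?_eq_none_iff _ _).mp h) hpre
    | some m => exact ⟨m, rfl⟩
  obtain ⟨n, hB⟩ : ∃ n, PySem.List.max? (ys.map (fun y => (y.length : Int))) (fun x => x) = some n := by
    cases h : PySem.List.max? (ys.map (fun y => (y.length : Int))) (fun x => x) with
    | none =>
      rw [PySem.List.max?_eq_none_iff, List.map_eq_nil_iff] at h
      exact absurd h hpre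
    | some n => exact ⟨n, rfl⟩
  rw [hA, hB]
  simp only
  -- n = len(m) = the maximal length
  have hmmem := PySem.List.max?_mem hA
  have hmmax := PySem.List.max?_isMax hA
  have hnmem := PySem.List.max?_mem hB
  have hnmax := PySem.List.max?_isMax hB
  have hn : n = (m.length : Int) := by
    rcases List.mem_map.mp hnmem with ⟨y, hy, hyn⟩
    apply le_antisymm
    · rw [← hyn]; exact hmmax y hy
    · exact hnmax _ (List.mem_map.mpr ⟨m, hmmem, rfl⟩)
  -- rewrite both sides as flatMap / flatten over columns
  rw [pvOuterA, pvExtend, List.nil_append, List.nil_append, hn]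
  have hNlen : ((PySem.List.pyRange 0 (m.length : Int) 1).map (fun _ => ([] : List Int))).length
      = m.length := by
    rw [List.length_map, PySem.List.length_pyRange_one]; simp
  have hbl : ∀ y ∈ ys, y.length ≤
      ((PySem.List.pyRange 0 (m.length : Int) 1).map (fun _ => ([] : List Int))).length := by
    intro y hy; rw [hNlen]; exact_mod_cast hmmax y hy
  set cols0 := (PySem.List.pyRange 0 (m.length : Int) 1).map (fun _ => ([] : List Int)) with hc0
  set colsF := ys.foldl (fun cols y =>
      (PySem.List.enumerate y 0).foldl (fun cols iv =>
        cols.set iv.1.toNat ((cols.getD iv.1.toNat []) ++ [iv.2])) cols) cols0 with hcF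
  have hlenF : colsF.length = m.length := by
    rw [hcF]
    have : ∀ (l : List (List Int)) (c : List (List Int)),
        (l.foldl (fun cols y =>
          (PySem.List.enumerate y 0).foldl (fun cols iv =>
            cols.set iv.1.toNat ((cols.getD iv.1.toNat []) ++ [iv.2])) cols) c).length = c.length := by
      intro l
      induction l with
      | nil => intro c; rfl
      | cons y t ih =>
        intro c
        rw [List.foldl_cons, ih]
        have h0 : ((0 : Nat) : Int) = (0 : Int) := by simp
        rw [← h0]; exact pvRowLen _ _
    rw [this, hNlen]
  have hget : ∀ j (hj : j < colsF.length), colsF[j] = pvCol ys (j : Int) := by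
    intro j hj
    have hj' : j < cols0.length := by rw [hNlen]; rw [hlenF] at hj; exact hj
    have hb := pvBucket ys cols0 hbl j hj'
    have hempty : cols0.getD j [] = [] := by
      rw [hc0]
      rcases Nat.lt_or_ge j (PySem.List.pyRange 0 (m.length : Int) 1).length with h | h
      · simp [List.getD_eq_getElem?_getD]
      · simp [List.getD_eq_getElem?_getD]
    rw [hempty, List.nil_append, ← hcF] at hb
    rw [List.getElem?_eq_getElem hj] at hb
    exact Option.some.inj hb
  have hflat : colsF.flatten
      = (List.range colsF.length).flatMap (fun k => pvCol ys ((0 + k : Nat) : Int)) := by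
    refine pvFlattenCols colsF (fun k => pvCol ys (k : Int)) 0 ?_
    intro j hj
    simp only [List.get_eq_getElem]
    rw [hget j hj]
    norm_num
  rw [hflat, hlenF, PySem.List.pyRange_one]
  rw [List.flatMap_map]
  simp
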